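-- pv_equiv track=rewrite | github.com/DamianEmilSPD/SPD | Projekt1/johnson3m_reading_from_file.py | Johnson3m
-- ===== SOURCE A (Python) =====
-- def Johnson3m(data_array):
--
--     tasks = []
--     for i in range(0,len(data_array)):
--         if data_array[i][0]>data_array[i][1]:
--            tasks.append(data_array[i])
--         else:
--            tasks.insert(0, data_array[i])
--     return tasks
-- ===== SOURCE B (Python) =====
-- def Johnson3m(data_array):
--     return ([t for t in reversed(data_array) if not t[0] > t[1]]
--             + [t for t in data_array if t[0] > t[1]])
-- ===== Notes on version B (the rewrite author's own statement) =====
-- stated objective: simpler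
-- what changed: Replaces A's single loop that mutates one list via insert(0)/append by two staged filter comprehensions: the non-strict group taken from the reversed input, concatenated with the strict group taken in order; no mutation and no quadratic front-inserts.
import Mathlib
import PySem

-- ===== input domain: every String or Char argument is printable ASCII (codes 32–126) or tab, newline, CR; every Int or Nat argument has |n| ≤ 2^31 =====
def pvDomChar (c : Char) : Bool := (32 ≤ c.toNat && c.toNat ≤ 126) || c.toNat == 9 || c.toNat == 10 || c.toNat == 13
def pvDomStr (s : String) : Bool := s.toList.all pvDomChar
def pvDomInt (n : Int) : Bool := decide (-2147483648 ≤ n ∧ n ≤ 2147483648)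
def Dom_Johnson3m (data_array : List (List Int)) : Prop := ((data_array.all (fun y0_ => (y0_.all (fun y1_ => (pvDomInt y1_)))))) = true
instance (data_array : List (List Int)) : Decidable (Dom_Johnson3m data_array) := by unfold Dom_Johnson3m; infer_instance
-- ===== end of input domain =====

-- B replaces A's single mutating loop (insert(0)/append on one list) by two staged filter
-- comprehensions: non-strict group over the reversed input ++ strict group in order.

-- row[0] > row[1]; exact wherever both indices exist (guaranteed by Pre_; the .getD 0 is
-- never reached on admitted inputs — Python raises IndexError there, excluded by Pre_).
def pvCmp (r : List Int) : Bool :=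
  decide ((PySem.List.pyGet? r 0).getD 0 > (PySem.List.pyGet? r 1).getD 0)

-- ===== PORT A =====
def Johnson3m (data_array : List (List Int)) : List (List Int) :=
  data_array.foldl
    (fun tasks r => if pvCmp r then tasks ++ [r] else r :: tasks) []

-- ===== PORT B =====
def Johnson3m_alt (data_array : List (List Int)) : List (List Int) :=
  data_array.reverse.filter (fun t => !pvCmp t) ++ data_array.filter (fun t => pvCmp t)

-- ===== PRECONDITION & SPEC =====
-- Pre_ excludes exactly the inputs on which Python A raises IndexError: a row with fewer than 2 entries.
def Pre_Johnson3m (data_array : List (List Int)) : Prop :=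
  ∀ r ∈ data_array, 2 ≤ r.length
instance (data_array : List (List Int)) : Decidable (Pre_Johnson3m data_array) := by
  unfold Pre_Johnson3m; infer_instance
def pvWitness_Johnson3m : List (List Int) := [[1, 2], [3, 1], [0, 0]]

def Spec_Johnson3m (data_array : List (List Int)) (out : List (List Int)) : Prop := out = Johnson3m_alt data_array
instance (data_array : List (List Int)) (out : List (List Int)) : Decidable (Spec_Johnson3m data_array out) := by unfold Spec_Johnson3m; infer_instance

-- ===== CLAIM (what is proved, stated in full; the proofs are below) =====
def Claim_equal_Johnson3m : Prop := ∀ (data_array : List (List Int)), Dom_Johnson3m data_array → Pre_Johnson3m data_array → Spec_Johnson3m data_array (Johnson3m data_array)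

-- ===== LEMMAS AND PROOFS =====

-- A's loop, started from F ++ B: inserts land before F, appends after B.
lemma foldA_split (data : List (List Int)) (F B : List (List Int)) :
    data.foldl (fun tasks r => if pvCmp r then tasks ++ [r] else r :: tasks) (F ++ B)
      = (data.filter (fun r => !pvCmp r)).reverse ++ F ++ B ++ data.filter (fun r => pvCmp r) := by
  induction data generalizing F B with
  | nil => simp
  | cons x xs ih =>
    simp only [List.foldl_cons, List.filter_cons]
    by_cases h : pvCmp x
    · have : (F ++ B) ++ [x] = F ++ (B ++ [x]) := by simp
      rw [h, if_pos rfl, this, ih F (B ++ [x])]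
      simp
    · have hb : pvCmp x = false := by simpa using h
      have : x :: (F ++ B) = (x :: F) ++ B := by simp
      rw [hb, if_neg (by simp), this, ih (x :: F) B]
      simp

-- ===== VERDICT (by name: the statement is the Claim_ definition above) =====
theorem Johnson3m_spec : Claim_equal_Johnson3m := by
  intro data _ _
  unfold Spec_Johnson3m Johnson3m Johnson3m_alt
  have hA := foldA_split data [] []
  simp only [List.append_nil] at hA
  rw [hA, List.filter_reverse]
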